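-- pv_equiv track=rewrite | github.com/speed-force/Deep-StRIP | residue_classification.py | ranges_repbndry
-- ===== SOURCE A (Python) =====
-- def ranges_repbndry(p, bndryres):
--     q = sorted(p)
--     i = 0
--     for j in range(1,len(q)):
--         if q[j] in bndryres:
--             yield (str(q[i])+"-"+str(q[j-1]))
--             i = j
--     yield (str(q[i])+"-"+str(q[-1]))
-- ===== SOURCE B (Python) =====
-- def ranges_repbndry(p, bndryres):
--     # Group sorted values into explicit segment lists (a new segment starts at
--     # each boundary value), then emit "first-last" per group. No index tracking.
--     q = sorted(p)
--     groups = [[q[0]]]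
--     for v in q[1:]:
--         if v in bndryres:
--             groups.append([v])
--         else:
--             groups[-1].append(v)
--     for g in groups:
--         yield str(g[0]) + "-" + str(g[-1])
-- ===== Notes on version B (the rewrite author's own statement) =====
-- stated objective: alternative
-- what changed: Instead of A's single index-tracking sweep over positions (mutable segment-start index, emitting while scanning), B materializes the segments themselves: it partitions the sorted values into an explicit list of segment sublists (a new sublist opened at each boundary value), then a second pass emits 'first-last' from each sublist; no positions/indices are used at all.
import Mathlib
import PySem

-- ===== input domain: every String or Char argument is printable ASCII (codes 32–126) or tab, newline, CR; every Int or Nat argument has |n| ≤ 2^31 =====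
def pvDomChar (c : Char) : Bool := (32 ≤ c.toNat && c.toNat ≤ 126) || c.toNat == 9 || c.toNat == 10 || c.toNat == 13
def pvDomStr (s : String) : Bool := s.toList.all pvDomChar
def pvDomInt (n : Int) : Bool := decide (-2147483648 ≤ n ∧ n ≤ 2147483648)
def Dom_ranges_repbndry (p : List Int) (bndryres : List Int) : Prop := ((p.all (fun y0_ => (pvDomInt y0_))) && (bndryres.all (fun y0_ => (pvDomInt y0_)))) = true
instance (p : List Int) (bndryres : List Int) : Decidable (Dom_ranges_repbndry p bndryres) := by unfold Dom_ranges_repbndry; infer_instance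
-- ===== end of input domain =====

-- B replaces A's index-tracking sweep by materializing the segments as explicit
-- value sublists and emitting "first-last" from each (objective: alternative).
-- Both Pythons are generators; equivalence is about the yielded sequence.

-- ===== PORT A =====
def ranges_repbndry (p : List Int) (bndryres : List Int) : List String :=
  let q := PySem.List.sorted p id
  let st := (PySem.List.pyRange 1 (q.length : Int) 1).foldl
      (fun (st : Int × List String) j =>
        if bndryres.contains (PySem.List.pyGetD q j 0) then
          (j, st.2 ++ [PySem.Int.toStr (PySem.List.pyGetD q st.1 0) ++ "-" ++
                       PySem.Int.toStr (PySem.List.pyGetD q (j - 1) 0)])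
        else st)
      ((0 : Int), ([] : List String))
  st.2 ++ [PySem.Int.toStr (PySem.List.pyGetD q st.1 0) ++ "-" ++
           PySem.Int.toStr (PySem.List.pyGetD q (-1) 0)]

-- ===== PORT B =====
-- On the empty list B's Python raises IndexError at q[0] (outside Pre_); the port returns [].
def ranges_repbndry_alt (p : List Int) (bndryres : List Int) : List String :=
  match PySem.List.sorted p id with
  | [] => []
  | h :: t =>
    let groups := t.foldl
        (fun (gs : List (List Int)) v =>
          if bndryres.contains v then gs ++ [[v]]
          else gs.dropLast ++ [gs.getLastD [] ++ [v]])
        [[h]]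
    groups.map (fun g => PySem.Int.toStr (PySem.List.pyGetD g 0 0) ++ "-" ++
                         PySem.Int.toStr (PySem.List.pyGetD g (-1) 0))

-- ===== PRECONDITION & SPEC =====
-- Pre_ excludes only the empty list, on which both Pythons raise IndexError (q[0]/q[-1]).
def Pre_ranges_repbndry (p : List Int) (bndryres : List Int) : Prop := p ≠ []
instance (p : List Int) (bndryres : List Int) : Decidable (Pre_ranges_repbndry p bndryres) := by
  unfold Pre_ranges_repbndry; infer_instance
def pvWitness_ranges_repbndry : List Int × List Int := ([3, 1, 7, 2], [2, 7])

def Spec_ranges_repbndry (p : List Int) (bndryres : List Int) (out : List String) : Prop := out = ranges_repbndry_alt p bndryres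
instance (p : List Int) (bndryres : List Int) (out : List String) : Decidable (Spec_ranges_repbndry p bndryres out) := by unfold Spec_ranges_repbndry; infer_instance

-- ===== CLAIM =====
def Claim_equal_ranges_repbndry : Prop := ∀ (p : List Int) (bndryres : List Int), Dom_ranges_repbndry p bndryres → Pre_ranges_repbndry p bndryres → Spec_ranges_repbndry p bndryres (ranges_repbndry p bndryres)

-- ===== LEMMAS AND PROOFS =====

-- Common specification: emitted segments of a tail, given the current segment's
-- first and previous (latest) value.
def rrSeg (bnd : List Int) (first prev : Int) : List Int → List String
  | [] => [PySem.Int.toStr first ++ "-" ++ PySem.Int.toStr prev]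
  | v :: rest =>
    if bnd.contains v then
      (PySem.Int.toStr first ++ "-" ++ PySem.Int.toStr prev) :: rrSeg bnd v v rest
    else rrSeg bnd first v rest

-- on a nonempty list, Python's q[-1] is q[len(q)-1].
theorem rr_last_get (q : List Int) (h : q ≠ []) :
    PySem.List.pyGetD q (-1) 0 = PySem.List.pyGetD q ((q.length : Int) - 1) 0 := by
  have hl : 1 ≤ q.length := List.length_pos_iff.mpr h
  simp [PySem.List.pyGetD, PySem.List.pyGet?, PySem.List.pyIdx?, hl]

-- A's sweep from index k onwards (plus the final yield) computes rrSeg of the suffix.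
theorem rr_A (q bnd : List Int) :
    ∀ (t : List Int) (k : Nat), q.drop k = t → 1 ≤ k → k ≤ q.length →
    ∀ (i : Int) (acc : List String),
    (let st := (PySem.List.pyRange (k : Int) (q.length : Int) 1).foldl
        (fun (st : Int × List String) j =>
          if bnd.contains (PySem.List.pyGetD q j 0) then
            (j, st.2 ++ [PySem.Int.toStr (PySem.List.pyGetD q st.1 0) ++ "-" ++
                         PySem.Int.toStr (PySem.List.pyGetD q (j - 1) 0)])
          else st) (i, acc)
     st.2 ++ [PySem.Int.toStr (PySem.List.pyGetD q st.1 0) ++ "-" ++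
              PySem.Int.toStr (PySem.List.pyGetD q (-1) 0)])
    = acc ++ rrSeg bnd (PySem.List.pyGetD q i 0) (PySem.List.pyGetD q ((k : Int) - 1) 0) t := by
  intro t
  induction t with
  | nil =>
    intro k hdrop h1 hk i acc
    have hlen : q.length ≤ k := by
      have := congrArg List.length hdrop
      simp at this; omega
    have hk' : k = q.length := le_antisymm hk hlen
    subst hk'
    have hq : q ≠ [] := by intro h; subst h; simp at h1
    simp [PySem.List.pyRange_one_eq_nil (le_refl ((q.length : Int))), rrSeg,
      rr_last_get q hq]
  | cons v rest ih =>
    intro k hdrop h1 hk i acc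
    have hklt : k < q.length := by
      have := congrArg List.length hdrop
      simp at this; omega
    have hsplit : q.drop k = q[k] :: q.drop (k + 1) := List.drop_eq_getElem_cons hklt
    rw [hdrop] at hsplit
    have hv : q[k] = v := by injection hsplit with h1' _; exact h1'.symm
    have hrest : q.drop (k + 1) = rest := by injection hsplit with _ h2'; exact h2'.symm
    have hlt : (k : Int) < (q.length : Int) := by exact_mod_cast hklt
    rw [PySem.List.pyRange_one_cons hlt]
    have hget : PySem.List.pyGetD q (k : Int) 0 = v := by
      simp [PySem.List.pyGetD_natCast, List.getD, List.getElem?_eq_getElem hklt, hv]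
    simp only [List.foldl_cons, hget]
    by_cases hb : bnd.contains v
    · simp only [hb, if_true]
      have hcast : ((k : Int) + 1) = ((k + 1 : Nat) : Int) := by push_cast; ring
      rw [hcast, ih (k + 1) hrest (by omega) (by omega)]
      have : ((k + 1 : Nat) : Int) - 1 = (k : Int) := by push_cast; ring
      rw [this, hget, rrSeg, if_pos hb]
      simp
    · simp only [hb, Bool.false_eq_true, if_false]
      have hcast : ((k : Int) + 1) = ((k + 1 : Nat) : Int) := by push_cast; ring
      rw [hcast, ih (k + 1) hrest (by omega) (by omega)]
      have : ((k + 1 : Nat) : Int) - 1 = (k : Int) := by push_cast; ring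
      rw [this, hget, rrSeg, if_neg hb]

-- B's fold keeps finished groups intact and grows the last one; mapping the
-- emitter over the result is the finished emissions followed by rrSeg of the tail.
theorem rr_B (bnd : List Int) :
    ∀ (t : List Int) (gs : List (List Int)) (g : List Int), g ≠ [] →
    ((t.foldl (fun (gs : List (List Int)) v =>
          if bnd.contains v then gs ++ [[v]]
          else gs.dropLast ++ [gs.getLastD [] ++ [v]]) (gs ++ [g])).map
        (fun g => PySem.Int.toStr (PySem.List.pyGetD g 0 0) ++ "-" ++
                  PySem.Int.toStr (PySem.List.pyGetD g (-1) 0)))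
    = gs.map (fun g => PySem.Int.toStr (PySem.List.pyGetD g 0 0) ++ "-" ++
                       PySem.Int.toStr (PySem.List.pyGetD g (-1) 0))
      ++ rrSeg bnd (PySem.List.pyGetD g 0 0) (PySem.List.pyGetD g (-1) 0) t := by
  intro t
  induction t with
  | nil => intro gs g hg; simp [rrSeg]
  | cons v rest ih =>
    intro gs g hg
    simp only [List.foldl_cons]
    have hs0 : PySem.List.pyGetD [v] 0 0 = v := PySem.List.pyGetD_zero_cons v [] 0
    have hs1 : PySem.List.pyGetD [v] (-1) 0 = v := by
      simp [PySem.List.pyGetD, PySem.List.pyGet?, PySem.List.pyIdx?]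
    by_cases hb : bnd.contains v
    · rw [if_pos hb]
      have := ih (gs ++ [g]) [v] (by simp)
      rw [hs0, hs1] at this
      rw [List.append_assoc] at this ⊢
      rw [this, rrSeg, if_pos hb]
      simp
    · rw [if_neg hb]
      have hdl : (gs ++ [g]).dropLast = gs := by simp
      have hgl : (gs ++ [g]).getLastD [] = g := by simp
      rw [hdl, hgl, ih gs (g ++ [v]) (by simp), rrSeg, if_neg hb]
      have h0 : PySem.List.pyGetD (g ++ [v]) 0 0 = PySem.List.pyGetD g 0 0 := by
        cases g with
        | nil => exact absurd rfl hg
        | cons x xs => simp [PySem.List.pyGetD_zero_cons]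
      rw [h0, PySem.List.pyGetD_neg_one_append_singleton]

-- ===== VERDICT =====
theorem ranges_repbndry_spec : Claim_equal_ranges_repbndry := by
  intro p bndryres _ hpre
  unfold Spec_ranges_repbndry
  unfold ranges_repbndry ranges_repbndry_alt
  have hne : PySem.List.sorted p id ≠ [] := by
    intro hnil
    have := congrArg List.length hnil
    rw [PySem.List.length_sorted] at this
    exact hpre (List.length_eq_zero_iff.mp this)
  cases hq : PySem.List.sorted p id with
  | nil => exact absurd hq hne
  | cons h t =>
    have hdrop : (h :: t).drop 1 = t := by simp
    have hA := rr_A (h :: t) bndryres t 1 hdrop (by omega) (by simp)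
      (0 : Int) ([] : List String)
    simp only [Nat.cast_one] at hA
    have h10 : (1 : Int) - 1 = 0 := by ring
    rw [h10, PySem.List.pyGetD_zero_cons] at hA
    have hB := rr_B bndryres t ([] : List (List Int)) [h] (by simp)
    have hb0 : PySem.List.pyGetD [h] 0 0 = h := PySem.List.pyGetD_zero_cons h [] 0
    have hb1 : PySem.List.pyGetD [h] (-1) 0 = h := by
      simp [PySem.List.pyGetD, PySem.List.pyGet?, PySem.List.pyIdx?]
    rw [hb0, hb1] at hB
    simp only [List.nil_append, List.map_nil] at hB
    simp only [hq]
    rw [hA, hB]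
    simp
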